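-- pv_equiv track=rewrite | github.com/srosy2/brush_paste | .ipynb_checkpoints/preprocess-checkpoint.py | find_min_quantites
-- ===== SOURCE A (Python) =====
-- def find_min_quantites(value):
--     a = list(value)
--     while 0 in a:
--         a.remove(0)
--     len_time = len(a)
--     counter = 0
--     for i in range(1, len_time - 1):
--         if a[i - 1] > a[i] and a[i] < a[i + 1]:
--             counter += 1
--         else:
--             pass
--     return counter
-- ===== SOURCE B (Python) =====
-- def find_min_quantites(value):
--     counter = 0
--     p2 = None
--     p1 = None
--     for x in value:
--         if x == 0:
--             continue
--         if p2 is not None and p2 > p1 and p1 < x: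
--             counter += 1
--         p2, p1 = p1, x
--     return counter
-- ===== Notes on version B (the rewrite author's own statement) =====
-- stated objective: alternative
-- what changed: Single streaming pass keeping the last two non-zero values in a sliding window instead of materialising a cleaned list via repeated 'while 0 in a: a.remove(0)' and then indexing triples.
import Mathlib
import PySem

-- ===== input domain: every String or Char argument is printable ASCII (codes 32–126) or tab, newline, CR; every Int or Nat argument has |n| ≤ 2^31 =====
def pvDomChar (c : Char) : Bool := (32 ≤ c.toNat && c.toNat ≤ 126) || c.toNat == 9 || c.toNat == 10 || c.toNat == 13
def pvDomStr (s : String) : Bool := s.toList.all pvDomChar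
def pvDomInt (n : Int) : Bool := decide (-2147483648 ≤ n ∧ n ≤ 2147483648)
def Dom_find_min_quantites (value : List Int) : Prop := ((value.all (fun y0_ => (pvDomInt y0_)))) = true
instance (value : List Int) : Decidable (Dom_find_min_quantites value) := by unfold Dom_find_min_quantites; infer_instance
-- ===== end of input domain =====

-- B replaces A's zero-removal-then-index scan by one streaming pass with a two-value window (same return value, proved below).

-- ===== PORT A =====
-- 'while 0 in a: a.remove(0)' — remove? is 'some (a.erase 0)' exactly when 0 ∈ a (PySem.List.remove?_eq_some_erase)
def pvRemoveZeros (a : List Int) : List Int :=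
  if h : (0 : Int) ∈ a then pvRemoveZeros (a.erase 0) else a
termination_by a.count 0
decreasing_by
  have h1 : 0 < a.count 0 := List.count_pos_iff.mpr h
  rw [List.count_erase_self]
  omega

def find_min_quantites (value : List Int) : Int :=
  let a := pvRemoveZeros value
  let len_time := PySem.List.len a
  -- the loop indices 1 ≤ i ≤ len-2 are always in range, so a[i] is pyGetD with an unused default
  (PySem.List.pyRange 1 (len_time - 1) 1).foldl
    (fun counter i =>
      if PySem.List.pyGetD a (i - 1) 0 > PySem.List.pyGetD a i 0 ∧
         PySem.List.pyGetD a i 0 < PySem.List.pyGetD a (i + 1) 0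
      then counter + 1 else counter) 0

-- ===== PORT B =====
-- state = (p2, p1, counter); Python's 'p2 is not None' guard: p2 is set only after p1 is,
-- so the comparison branch fires exactly when both are set (the (some, none) case is unreachable)
def pvStep (st : Option Int × Option Int × Int) (x : Int) : Option Int × Option Int × Int :=
  if x = 0 then st
  else
    let c :=
      match st.1, st.2.1 with
      | some p2, some p1 => if p2 > p1 ∧ p1 < x then st.2.2 + 1 else st.2.2
      | _, _ => st.2.2
    (st.2.1, some x, c)

def find_min_quantites_alt (value : List Int) : Int :=
  (value.foldl pvStep (none, none, 0)).2.2

-- ===== PRECONDITION & SPEC =====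
def Spec_find_min_quantites (value : List Int) (out : Int) : Prop := out = find_min_quantites_alt value
instance (value : List Int) (out : Int) : Decidable (Spec_find_min_quantites value out) := by unfold Spec_find_min_quantites; infer_instance

-- ===== CLAIM (what is proved, stated in full; the proofs are below) =====
def Claim_equal_find_min_quantites : Prop := ∀ (value : List Int), Dom_find_min_quantites value → Spec_find_min_quantites value (find_min_quantites value)

-- ===== LEMMAS AND PROOFS =====

-- number of strict local minima, structurally
def cntT : List Int → Int
  | x :: y :: z :: t => (if x > y ∧ y < z then 1 else 0) + cntT (y :: z :: t)
  | _ => 0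

-- pvStep on a nonzero element, without the zero test
def pvStepNZ (st : Option Int × Option Int × Int) (x : Int) : Option Int × Option Int × Int :=
  (st.2.1, some x,
    match st.1, st.2.1 with
    | some p2, some p1 => if p2 > p1 ∧ p1 < x then st.2.2 + 1 else st.2.2
    | _, _ => st.2.2)

lemma pvStep_eq (st : Option Int × Option Int × Int) (x : Int) :
    pvStep st x = if x ≠ 0 then pvStepNZ st x else st := by
  by_cases h : x = 0 <;> simp [pvStep, pvStepNZ, h]

lemma filter_erase_zero (a : List Int) :
    ((a.erase 0).filter (fun x => x ≠ 0)) = a.filter (fun x => x ≠ 0) := by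
  induction a with
  | nil => simp
  | cons y t ih =>
    by_cases hy : y = 0
    · subst hy; simp
    · rw [List.erase_cons_tail (by simpa using hy)]
      simp [hy]
      simpa [decide_not] using ih

lemma removeZeros_eq (a : List Int) : pvRemoveZeros a = a.filter (fun x => x ≠ 0) := by
  rw [pvRemoveZeros]
  split
  · next h =>
    have IH := removeZeros_eq (a.erase 0)
    rw [IH, filter_erase_zero]
  · next h =>
    symm
    refine List.filter_eq_self.mpr ?_
    intro x hx
    simp only [decide_eq_true_eq]
    intro hx0
    exact h (hx0 ▸ hx)
termination_by a.count 0
decreasing_by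
  have h1 : 0 < a.count 0 := List.count_pos_iff.mpr (by assumption)
  rw [List.count_erase_self]
  omega

lemma cnt_range (a : List Int) :
    (((List.range (a.length - 2)).countP
      (fun j => decide (a.getD j 0 > a.getD (j+1) 0 ∧ a.getD (j+1) 0 < a.getD (j+2) 0)) : Nat) : Int)
      = cntT a := by
  match a with
  | [] => simp [cntT]
  | [_] => simp [cntT]
  | [_, _] => simp [cntT]
  | x :: y :: z :: t =>
    have IH := cnt_range (y :: z :: t)
    have hlen : (x :: y :: z :: t).length - 2 = ((y :: z :: t).length - 2) + 1 := by
      simp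
    rw [hlen, List.range_succ_eq_map, List.countP_cons, List.countP_map]
    have hshift : ((fun j => decide ((x :: y :: z :: t).getD j 0 > (x :: y :: z :: t).getD (j+1) 0 ∧
            (x :: y :: z :: t).getD (j+1) 0 < (x :: y :: z :: t).getD (j+2) 0)) ∘ Nat.succ)
        = (fun j => decide ((y :: z :: t).getD j 0 > (y :: z :: t).getD (j+1) 0 ∧
            (y :: z :: t).getD (j+1) 0 < (y :: z :: t).getD (j+2) 0)) := by
      funext j
      simp [Function.comp, List.getD]
    rw [hshift]
    simp only [cntT]
    rw [← IH]
    simp [List.getD]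
    split_ifs <;> ring
termination_by a.length

lemma stream_run (t : List Int) (p2 p1 c : Int) :
    (t.foldl pvStepNZ (some p2, some p1, c)).2.2 = c + cntT (p2 :: p1 :: t) := by
  induction t generalizing p2 p1 c with
  | nil => simp [cntT]
  | cons x t ih =>
    simp only [List.foldl_cons, pvStepNZ]
    rw [ih]
    simp only [cntT]
    split_ifs <;> ring

lemma A_loop_eq_cntT (a : List Int) :
    (PySem.List.pyRange 1 (PySem.List.len a - 1) 1).foldl
      (fun counter i =>
        if PySem.List.pyGetD a (i - 1) 0 > PySem.List.pyGetD a i 0 ∧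
           PySem.List.pyGetD a i 0 < PySem.List.pyGetD a (i + 1) 0
        then counter + 1 else counter) 0 = cntT a := by
  rw [PySem.List.foldl_ite_add_one]
  rw [PySem.List.pyRange_one]
  rw [List.countP_map]
  have hlen : ((PySem.List.len a - 1 - 1)).toNat = a.length - 2 := by
    simp [PySem.List.len_eq]; omega
  rw [hlen]
  have hfun : ((fun i => decide (PySem.List.pyGetD a (i - 1) 0 > PySem.List.pyGetD a i 0 ∧
          PySem.List.pyGetD a i 0 < PySem.List.pyGetD a (i + 1) 0)) ∘ (fun k : Nat => (1:Int) + ↑k))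
      = (fun j : Nat => decide (a.getD j 0 > a.getD (j+1) 0 ∧ a.getD (j+1) 0 < a.getD (j+2) 0)) := by
    funext k
    simp only [Function.comp_apply]
    have e0 : (1:Int) + k - 1 = ((k : Nat) : Int) := by omega
    have e1 : (1:Int) + k = ((k + 1 : Nat) : Int) := by omega
    have e2 : (1:Int) + k + 1 = ((k + 2 : Nat) : Int) := by omega
    rw [e2, e0, e1]
    simp only [PySem.List.pyGetD_natCast]
  rw [hfun, zero_add, cnt_range]

lemma B_filter (value : List Int) :
    find_min_quantites_alt value
      = ((value.filter (fun x => x ≠ 0)).foldl pvStepNZ (none, none, 0)).2.2 := by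
  unfold find_min_quantites_alt
  have hf : value.foldl pvStep (none, none, 0)
      = value.foldl (fun st x => if x ≠ 0 then pvStepNZ st x else st) (none, none, 0) :=
    PySem.List.foldl_congr_mem _ _ _ _ (fun st x _ => pvStep_eq st x)
  rw [hf, PySem.List.foldl_ite_eq_foldl_filter]

lemma stream_eq_cntT (c : List Int) :
    (c.foldl pvStepNZ (none, none, 0)).2.2 = cntT c := by
  match c with
  | [] => rfl
  | [_] => rfl
  | x :: y :: t =>
    simp only [List.foldl_cons, pvStepNZ]
    rw [stream_run]
    simp

-- ===== VERDICT (by name: the statement is the Claim_ definition above) =====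
theorem find_min_quantites_spec : Claim_equal_find_min_quantites := by
  intro value _
  show find_min_quantites value = find_min_quantites_alt value
  rw [B_filter, stream_eq_cntT]
  simp only [find_min_quantites]
  rw [removeZeros_eq, A_loop_eq_cntT]
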